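-- pv_equiv track=rewrite | github.com/kryezleo/KRY | Carmichael Zahl/Carmichael.py | ist_carmichael_zahl_mit_begruendung
-- ===== SOURCE A (Python) =====
-- def ist_primzahl(n):
--     """Prüft ob n eine Primzahl ist"""
--     if n < 2:
--         return False
--     if n == 2:
--         return True
--     if n % 2 == 0:
--         return False
--     for i in range(3, int(n ** 0.5) + 1, 2):
--         if n % i == 0:
--             return False
--     return True
--
-- def primfaktoren(n):
--     """Gibt die Liste der eindeutigen Primfaktoren zurück"""
--     faktoren = []
--     d = 2
--     temp_n = n
--     while d * d <= temp_n:
--         if temp_n % d == 0: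
--             faktoren.append(d)
--             while temp_n % d == 0:
--                 temp_n //= d
--         d += 1
--     if temp_n > 1:
--         faktoren.append(temp_n)
--     return faktoren
--
-- def ist_quadratfrei(n, faktoren):
--     """Prüft ob n quadratfrei ist (kein Primfaktor kommt mehrfach vor)"""
--     for p in faktoren:
--         if n % (p * p) == 0:
--             return False
--     return True
--
-- def ist_carmichael_zahl_mit_begruendung(n):
--     """Prüft ob n eine Carmichael-Zahl ist und gibt Begründung zurück"""
--     # Carmichael-Zahlen müssen zusammengesetzt sein
--     if n < 2:
--         return False, f"{n} ist kleiner als 2"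
--
--     if ist_primzahl(n):
--         return False, f"{n} ist eine Primzahl (muss zusammengesetzt sein)"
--
--     # Primfaktoren bestimmen
--     faktoren = primfaktoren(n)
--
--     # Mindestens 3 verschiedene Primfaktoren
--     if len(faktoren) < 3:
--         return False, f"{n} hat nur {len(faktoren)} Primfaktor(en): {faktoren} (benötigt mindestens 3)"
--
--     # Muss quadratfrei sein
--     if not ist_quadratfrei(n, faktoren):
--         return False, f"{n} ist nicht quadratfrei (ein Primfaktor kommt mehrfach vor)"
--
--     # Für jeden Primfaktor p muss gelten: (p-1) teilt (n-1)
--     for p in faktoren: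
--         if (n - 1) % (p - 1) != 0:
--             return False, f"Für Primfaktor {p} gilt nicht: ({p}-1) teilt ({n}-1)"
--
--     return True, f"{n} erfüllt alle Kriterien: Primfaktoren {faktoren}, quadratfrei, (p-1) teilt (n-1) für alle p"
-- ===== SOURCE B (Python) =====
-- def ist_carmichael_zahl_mit_begruendung(n):
--     """Prüft ob n eine Carmichael-Zahl ist und gibt Begründung zurück"""
--     if n < 2:
--         return False, f"{n} ist kleiner als 2"
--
--     # Recursive smallest-factor factorization: the full multiset of prime
--     # factors of m, in nondecreasing order (no separate primality test needed).
--     def zerlege(m):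
--         d = 2
--         while d * d <= m:
--             if m % d == 0:
--                 return [d] + zerlege(m // d)
--             d += 1
--         return [m]
--
--     mult = zerlege(n)
--
--     # n is prime exactly when its prime multiset is a single element
--     if len(mult) == 1:
--         return False, f"{n} ist eine Primzahl (muss zusammengesetzt sein)"
--
--     # unique primes = consecutive dedup of the sorted multiset
--     primes = []
--     for p in mult:
--         if not primes or primes[-1] != p:
--             primes.append(p)
--
--     if len(primes) < 3:
--         return False, f"{n} hat nur {len(primes)} Primfaktor(en): {primes} (benötigt mindestens 3)"
--
--     # squarefree iff the multiset has no repeated prime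
--     if len(primes) != len(mult):
--         return False, f"{n} ist nicht quadratfrei (ein Primfaktor kommt mehrfach vor)"
--
--     for p in primes:
--         if (n - 1) % (p - 1) != 0:
--             return False, f"Für Primfaktor {p} gilt nicht: ({p}-1) teilt ({n}-1)"
--
--     return True, f"{n} erfüllt alle Kriterien: Primfaktoren {primes}, quadratfrei, (p-1) teilt (n-1) für alle p"
-- ===== Notes on version B (the rewrite author's own statement) =====
-- stated objective: alternative
-- what changed: B drops the separate trial-division primality test and A's unique-prime factorization with its squarefree re-scan: it computes the full nondecreasing prime multiset by a recursive smallest-factor decomposition, reads primality off the multiset having one element, obtains the unique primes by consecutive dedup, and decides squarefreeness by comparing the dedup'd and full lengths; messages and branch order are unchanged.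
import Mathlib
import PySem

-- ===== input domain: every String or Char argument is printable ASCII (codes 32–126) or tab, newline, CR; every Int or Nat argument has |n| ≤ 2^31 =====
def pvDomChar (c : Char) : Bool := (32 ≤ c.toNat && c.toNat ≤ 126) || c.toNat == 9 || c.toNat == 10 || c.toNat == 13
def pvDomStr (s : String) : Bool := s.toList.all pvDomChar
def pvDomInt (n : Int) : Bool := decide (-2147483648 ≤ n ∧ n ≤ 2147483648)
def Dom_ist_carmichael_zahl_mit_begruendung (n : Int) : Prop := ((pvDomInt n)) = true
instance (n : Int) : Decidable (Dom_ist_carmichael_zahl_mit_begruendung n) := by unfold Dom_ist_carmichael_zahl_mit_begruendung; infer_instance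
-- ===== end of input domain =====

-- B replaces A's primality test + unique-prime factorization + squarefree re-scan by ONE recursive
-- smallest-factor decomposition into the full prime multiset: primality = multiset has one element,
-- unique primes = consecutive dedup, squarefree = dedup loses no element; same messages and branch
-- order. Objective: alternative (not measured faster).

-- ===== PORT A =====

-- Python list repr "[2, 3, 5]" for a list of ints (used by both ports' f-strings)
def pyListRepr (xs : List Int) : String := "[" ++ String.intercalate ", " (xs.map PySem.Int.toStr) ++ "]"

-- int(n ** 0.5) is ported as Nat.sqrt; exact for 0 ≤ n ≤ 2^31 (the inputs admitted by Dom_)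
def ist_primzahl (n : Int) : Bool :=
  if n < 2 then false
  else if n = 2 then true
  else if PySem.Int.mod n 2 = 0 then false
  else if (PySem.List.pyRange 3 ((n.toNat.sqrt : Int) + 1) 2).any (fun i => PySem.Int.mod n i == 0) then false
  else true

-- termination lemma cited by both ports' division loops
theorem pv_floordiv_toNat_lt (t d : Int) (h : 2 ≤ d ∧ 1 ≤ t ∧ PySem.Int.mod t d = 0) :
    (PySem.Int.floordiv t d).toNat < t.toNat := by
  obtain ⟨hd, ht, -⟩ := h
  rw [PySem.Int.floordiv_eq_ediv_of_pos (by omega)]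
  have h1 : t / d < t := by
    rw [Int.ediv_lt_iff_lt_mul (by omega)]
    have h2 := mul_lt_mul_of_pos_left (show (1 : Int) < d by omega) (show (0 : Int) < t by omega)
    rwa [mul_one] at h2
  have h2 : 0 ≤ t / d := Int.ediv_nonneg (by omega) (by omega)
  omega

-- inner `while temp_n % d == 0: temp_n //= d` (the guards 2 ≤ d, 1 ≤ t only make it total; they hold at every call site)
def pfInner (t d : Int) : Int :=
  if h : 2 ≤ d ∧ 1 ≤ t ∧ PySem.Int.mod t d = 0 then pfInner (PySem.Int.floordiv t d) d else t
  termination_by t.toNat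
  decreasing_by exact pv_floordiv_toNat_lt t d h

-- the port of pfLoop cites this for termination
theorem pfInner_le (t d : Int) : pfInner t d ≤ t := by
  fun_induction pfInner t d with
  | case1 t h ih =>
    obtain ⟨hd, ht, hm⟩ := h
    have hq : PySem.Int.floordiv t d ≤ t := by
      have h1 := pv_floordiv_toNat_lt t d ⟨hd, ht, hm⟩
      have h2 : 0 ≤ PySem.Int.floordiv t d := by
        rw [PySem.Int.floordiv_eq_ediv_of_pos (by omega)]
        exact Int.ediv_nonneg (by omega) (by omega)
      omega
    exact le_trans ih hq
  | case2 t h => exact le_refl t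

-- termination lemmas cited by A's outer loop and B's factor search
theorem pv_outer_dec1 (t d : Int) (h : d * d ≤ t ∧ 2 ≤ d) :
    (pfInner t d - (d + 1)).toNat < (t - d).toNat := by
  obtain ⟨hdt, hd⟩ := h
  have h0 := mul_lt_mul_of_pos_right (show (1 : Int) < d by omega) (show (0 : Int) < d by omega)
  rw [one_mul] at h0
  have h1 : d < t := lt_of_lt_of_le h0 hdt
  have h2 : pfInner t d ≤ t := pfInner_le t d
  omega

theorem pv_outer_dec2 (t d : Int) (h : d * d ≤ t ∧ 2 ≤ d) :
    (t - (d + 1)).toNat < (t - d).toNat := by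
  obtain ⟨hdt, hd⟩ := h
  have h0 := mul_lt_mul_of_pos_right (show (1 : Int) < d by omega) (show (0 : Int) < d by omega)
  rw [one_mul] at h0
  have h1 : d < t := lt_of_lt_of_le h0 hdt
  omega

-- outer `while d * d <= temp_n` loop of primfaktoren; returns (faktoren, final temp_n)
def pfLoop (t d : Int) (acc : List Int) : List Int × Int :=
  if h : d * d ≤ t ∧ 2 ≤ d then
    if PySem.Int.mod t d = 0 then pfLoop (pfInner t d) (d + 1) (acc ++ [d])
    else pfLoop t (d + 1) acc
  else (acc, t)
  termination_by (t - d).toNat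
  decreasing_by
  · exact pv_outer_dec1 t d h
  · exact pv_outer_dec2 t d h

def primfaktoren (n : Int) : List Int :=
  let r := pfLoop n 2 []
  if r.2 > 1 then r.1 ++ [r.2] else r.1

def ist_quadratfrei (n : Int) (faktoren : List Int) : Bool :=
  !faktoren.any (fun p => PySem.Int.mod n (p * p) == 0)

-- A's final `for p in faktoren` loop with its early return and the success message
def korLoopA (n : Int) (faktoren : List Int) : List Int → Bool × String
  | [] => (true, PySem.Int.toStr n ++ " erfüllt alle Kriterien: Primfaktoren " ++ pyListRepr faktoren ++ ", quadratfrei, (p-1) teilt (n-1) für alle p")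
  | p :: rest =>
    if PySem.Int.mod (n - 1) (p - 1) ≠ 0 then
      (false, "Für Primfaktor " ++ PySem.Int.toStr p ++ " gilt nicht: (" ++ PySem.Int.toStr p ++ "-1) teilt (" ++ PySem.Int.toStr n ++ "-1)")
    else korLoopA n faktoren rest

def ist_carmichael_zahl_mit_begruendung (n : Int) : Bool × String :=
  if n < 2 then (false, PySem.Int.toStr n ++ " ist kleiner als 2")
  else if ist_primzahl n then (false, PySem.Int.toStr n ++ " ist eine Primzahl (muss zusammengesetzt sein)")
  else
    let faktoren := primfaktoren n
    if faktoren.length < 3 then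
      (false, PySem.Int.toStr n ++ " hat nur " ++ PySem.Int.toStr (faktoren.length : Int) ++ " Primfaktor(en): " ++ pyListRepr faktoren ++ " (benötigt mindestens 3)")
    else if !ist_quadratfrei n faktoren then
      (false, PySem.Int.toStr n ++ " ist nicht quadratfrei (ein Primfaktor kommt mehrfach vor)")
    else korLoopA n faktoren faktoren

-- ===== PORT B =====

-- `while d*d <= m: if m % d == 0: return …; d += 1` — the first divisor found, none if the loop ends
-- (the 2 ≤ d conjunct only makes the recursion total; d starts at 2 and only grows)
def zerlegeFind (m d : Int) : Option Int :=
  if h : d * d ≤ m ∧ 2 ≤ d then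
    if PySem.Int.mod m d = 0 then some d else zerlegeFind m (d + 1)
  else none
  termination_by (m - d).toNat
  decreasing_by exact pv_outer_dec2 m d h

-- the port of zerlege cites this for termination
theorem zerlegeFind_some (m d0 : Int) : ∀ d : Int, zerlegeFind m d0 = some d →
    2 ≤ d ∧ d * d ≤ m ∧ PySem.Int.mod m d = 0 := by
  fun_induction zerlegeFind m d0 with
  | case1 d h hm =>
    intro p hp
    obtain rfl : d = p := by simpa using hp
    exact ⟨h.2, h.1, hm⟩
  | case2 d h hm ih => exact ih
  | case3 d h =>
    intro p hp
    simp at hp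

-- B's recursive smallest-factor factorization: the full prime multiset, nondecreasing
def zerlege (m : Int) : List Int :=
  match hf : zerlegeFind m 2 with
  | some d => d :: zerlege (PySem.Int.floordiv m d)
  | none => [m]
  termination_by m.toNat
  decreasing_by
    obtain ⟨hd2, hdm, hmod⟩ := zerlegeFind_some m 2 d hf
    exact pv_floordiv_toNat_lt m d ⟨hd2, by nlinarith, hmod⟩

-- `for p in mult: if not primes or primes[-1] != p: primes.append(p)`
def dedupLoop (primes : List Int) : List Int → List Int
  | [] => primes
  | p :: rest =>
    if primes = [] ∨ primes.getLast? ≠ some p then dedupLoop (primes ++ [p]) rest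
    else dedupLoop primes rest

-- B's final `for p in primes` loop with its early return and the success message
def korLoopB (n : Int) (primes : List Int) : List Int → Bool × String
  | [] => (true, PySem.Int.toStr n ++ " erfüllt alle Kriterien: Primfaktoren " ++ pyListRepr primes ++ ", quadratfrei, (p-1) teilt (n-1) für alle p")
  | p :: rest =>
    if PySem.Int.mod (n - 1) (p - 1) ≠ 0 then
      (false, "Für Primfaktor " ++ PySem.Int.toStr p ++ " gilt nicht: (" ++ PySem.Int.toStr p ++ "-1) teilt (" ++ PySem.Int.toStr n ++ "-1)")
    else korLoopB n primes rest

def ist_carmichael_zahl_mit_begruendung_alt (n : Int) : Bool × String :=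
  if n < 2 then (false, PySem.Int.toStr n ++ " ist kleiner als 2")
  else
    let mult := zerlege n
    if mult.length = 1 then (false, PySem.Int.toStr n ++ " ist eine Primzahl (muss zusammengesetzt sein)")
    else
      let primes := dedupLoop [] mult
      if primes.length < 3 then
        (false, PySem.Int.toStr n ++ " hat nur " ++ PySem.Int.toStr (primes.length : Int) ++ " Primfaktor(en): " ++ pyListRepr primes ++ " (benötigt mindestens 3)")
      else if primes.length ≠ mult.length then
        (false, PySem.Int.toStr n ++ " ist nicht quadratfrei (ein Primfaktor kommt mehrfach vor)")
      else korLoopB n primes primes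

-- ===== PRECONDITION & SPEC =====
def Spec_ist_carmichael_zahl_mit_begruendung (n : Int) (out : Bool × String) : Prop := out = ist_carmichael_zahl_mit_begruendung_alt n
instance (n : Int) (out : Bool × String) : Decidable (Spec_ist_carmichael_zahl_mit_begruendung n out) := by unfold Spec_ist_carmichael_zahl_mit_begruendung; infer_instance

-- ===== CLAIM =====
def Claim_equal_ist_carmichael_zahl_mit_begruendung : Prop := ∀ (n : Int), Dom_ist_carmichael_zahl_mit_begruendung n → Spec_ist_carmichael_zahl_mit_begruendung n (ist_carmichael_zahl_mit_begruendung n)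

-- ===== LEMMAS AND PROOFS =====

-- pfInner divides out d completely: t = d^k * result, d no longer divides
theorem pfInner_spec (t d : Int) : 1 ≤ t → 2 ≤ d →
    ∃ k : ℕ, t = d ^ k * pfInner t d ∧ ¬ d ∣ pfInner t d ∧ 1 ≤ pfInner t d ∧ (d ∣ t → 1 ≤ k) := by
  fun_induction pfInner t d with
  | case1 t h ih =>
    obtain ⟨hd', ht', hm⟩ := h
    intro ht hd
    have hdvd : d ∣ t := (PySem.Int.mod_eq_zero_iff_dvd t d).mp hm
    have hq : PySem.Int.floordiv t d = t / d := PySem.Int.floordiv_eq_ediv_of_pos (by omega)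
    have hmul : d * (t / d) = t := Int.mul_ediv_cancel' hdvd
    have ht1 : 1 ≤ t / d := by
      rcases Int.lt_or_le (t / d) 1 with hlt | hle
      · nlinarith
      · exact hle
    obtain ⟨k, hkt, hknd, hk1, -⟩ := ih (by rw [hq]; exact ht1) hd'
    have hmul' : d * PySem.Int.floordiv t d = t := by rw [hq]; exact hmul
    refine ⟨k + 1, ?_, hknd, hk1, fun _ => by omega⟩
    calc t = d * PySem.Int.floordiv t d := hmul'.symm
      _ = d * (d ^ k * pfInner (PySem.Int.floordiv t d) d) := by rw [← hkt]
      _ = d ^ (k + 1) * pfInner (PySem.Int.floordiv t d) d := by rw [pow_succ]; ring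
  | case2 t h =>
    intro ht hd
    refine ⟨0, by simp, ?_, ht, ?_⟩
    · intro hdvd
      exact h ⟨hd, ht, (PySem.Int.mod_eq_zero_iff_dvd t d).mpr hdvd⟩
    · intro hdvd
      exact absurd ⟨hd, ht, (PySem.Int.mod_eq_zero_iff_dvd t d).mpr hdvd⟩ h

-- the least divisor ≥ 2 of t is prime
theorem pv_least_divisor_prime (t d : Int) (hd2 : 2 ≤ d) (hdvd : d ∣ t)
    (hsmall : ∀ k : Int, 2 ≤ k → k < d → ¬ k ∣ t) : Prime d := by
  have hnat : d.toNat.Prime := by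
    rw [Nat.prime_def_lt]
    refine ⟨by omega, ?_⟩
    intro m hm1 hm2
    by_contra hne
    have hm2' : (2 : ℤ) ≤ (m : ℤ) := by
      rcases Nat.eq_zero_or_pos m with h0 | h0
      · subst h0; simp at hm2; omega
      · have : m ≠ 1 := hne
        omega
    have hmd : (m : ℤ) ∣ d := by
      have hx : (m : ℤ) ∣ (d.toNat : ℤ) := Int.natCast_dvd_natCast.mpr hm2
      rwa [Int.toNat_of_nonneg (by omega)] at hx
    exact hsmall m hm2' (by omega) (hmd.trans hdvd)
  have hx : Prime ((d.toNat : ℤ)) := Nat.prime_iff_prime_int.mp hnat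
  rwa [Int.toNat_of_nonneg (by omega)] at hx

-- no divisor below d, and t < d²: t is prime
theorem pv_prime_of_no_small_divisor (t d : Int) (h2 : 2 ≤ t) (hd : 2 ≤ d) (hlt : t < d * d)
    (hsmall : ∀ k : Int, 2 ≤ k → k < d → ¬ k ∣ t) : Prime t := by
  have ht0 : (t.toNat : ℤ) = t := Int.toNat_of_nonneg (by omega)
  by_cases hp : t.toNat.Prime
  · rw [← ht0]; exact Nat.prime_iff_prime_int.mp hp
  · exfalso
    have hmf := Nat.minFac_dvd t.toNat
    have hmfp := Nat.minFac_prime (show t.toNat ≠ 1 by omega)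
    have hsq := Nat.minFac_sq_le_self (show 0 < t.toNat by omega) hp
    rw [pow_two] at hsq
    have hk2 : (2 : ℤ) ≤ (t.toNat.minFac : ℤ) := by exact_mod_cast hmfp.two_le
    have hkdvd : (t.toNat.minFac : ℤ) ∣ t := by rw [← ht0]; exact_mod_cast hmf
    have hkk : (t.toNat.minFac : ℤ) * (t.toNat.minFac : ℤ) ≤ t := by
      rw [← ht0]; exact_mod_cast hsq
    have hkd : (t.toNat.minFac : ℤ) < d := by
      by_contra hcon
      push_neg at hcon
      have : d * d ≤ (t.toNat.minFac : ℤ) * (t.toNat.minFac : ℤ) :=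
        mul_le_mul hcon hcon (by omega) (by omega)
      omega
    exact hsmall _ hk2 hkd hkdvd

-- a divisor ≥ 2 of a prime ≥ 2 is the prime itself
theorem pv_eq_of_dvd_prime (p t : Int) (hp2 : 2 ≤ p) (ht2 : 2 ≤ t) (htp : Prime t)
    (hdvd : p ∣ t) : p = t := by
  have h1 : (p.toNat : ℤ) = p := Int.toNat_of_nonneg (by omega)
  have h2 : (t.toNat : ℤ) = t := Int.toNat_of_nonneg (by omega)
  have hn : p.toNat ∣ t.toNat := by
    have : ((p.toNat : ℕ) : ℤ) ∣ ((t.toNat : ℕ) : ℤ) := by rw [h1, h2]; exact hdvd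
    exact_mod_cast this
  have htn : t.toNat.Prime := by
    have := Int.prime_iff_natAbs_prime.mp htp
    have hna : t.natAbs = t.toNat := by omega
    rwa [hna] at this
  rcases htn.eq_one_or_self_of_dvd p.toNat hn with h | h
  · omega
  · omega

-- the main invariant of A's factorization loop
theorem pfLoop_char (n t d : Int) (acc : List Int) :
    ∀ c : Int, n = c * t → 1 ≤ t → 2 ≤ d →
    (∀ k : Int, 2 ≤ k → k < d → ¬ k ∣ t) →
    (∀ q : Int, Prime q → q ∣ c → q < d) →
    acc.Pairwise (· < ·) →
    (∀ a ∈ acc, a < d) →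
    (∀ p : Int, p ∈ acc ↔ Prime p ∧ p ∣ n ∧ 2 ≤ p ∧ p < d) →
    (pfLoop t d acc).1.Pairwise (· < ·) ∧ 1 ≤ (pfLoop t d acc).2 ∧
      (2 ≤ (pfLoop t d acc).2 → (∀ p ∈ (pfLoop t d acc).1, p < (pfLoop t d acc).2) ∧
        Prime (pfLoop t d acc).2 ∧ (pfLoop t d acc).2 ∣ n) ∧
      (∀ p : Int, (p ∈ (pfLoop t d acc).1 ∨ (2 ≤ (pfLoop t d acc).2 ∧ p = (pfLoop t d acc).2)) ↔
        Prime p ∧ p ∣ n ∧ 2 ≤ p) := by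
  fun_induction pfLoop t d acc with
  | case1 t d acc h hm ih =>
    intro c hn ht hd hsmall hc haccpw haccbd hacchar
    obtain ⟨hdt, hd2⟩ := h
    have hdvd : d ∣ t := (PySem.Int.mod_eq_zero_iff_dvd t d).mp hm
    obtain ⟨k, hkt, hknd, ht'1, hkpos⟩ := pfInner_spec t d ht hd2
    have hk1 : 1 ≤ k := hkpos hdvd
    have hdprime : Prime d := pv_least_divisor_prime t d hd2 hdvd hsmall
    have htdvdn : t ∣ n := ⟨c, by rw [hn]; ring⟩
    have ht'dvdt : pfInner t d ∣ t := ⟨d ^ k, by linear_combination hkt⟩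
    have hddvdn : d ∣ n := hdvd.trans htdvdn
    refine ih (c * d ^ k) (by rw [hn]; linear_combination c * hkt) ht'1 (by omega) ?_ ?_ ?_ ?_ ?_
    · intro k' hk'2 hk'd hk'dvd
      rcases lt_or_eq_of_le (show k' ≤ d by omega) with hlt | heq
      · exact hsmall k' hk'2 hlt (hk'dvd.trans ht'dvdt)
      · exact hknd (heq ▸ hk'dvd)
    · intro q hq hqdvd
      rcases hq.dvd_mul.mp hqdvd with hqc | hqd
      · have := hc q hq hqc; omega
      · have hqd' : q ∣ d := hq.dvd_of_dvd_pow hqd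
        have := Int.le_of_dvd (by omega) hqd'
        omega
    · rw [List.pairwise_append]
      refine ⟨haccpw, by simp, ?_⟩
      intro a ha b hb
      obtain rfl : b = d := by simpa using hb
      exact haccbd a ha
    · intro a ha
      rcases List.mem_append.mp ha with h' | h'
      · have := haccbd a h'; omega
      · obtain rfl : a = d := by simpa using h'
        omega
    · intro p
      constructor
      · intro hp
        rcases List.mem_append.mp hp with h' | h'
        · obtain ⟨hp1, hp2, hp3, hp4⟩ := (hacchar p).mp h'
          exact ⟨hp1, hp2, hp3, by omega⟩
        · obtain rfl : p = d := by simpa using h'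
          exact ⟨hdprime, hddvdn, hd2, by omega⟩
      · rintro ⟨hp1, hp2, hp3, hp4⟩
        by_cases hpd : p = d
        · exact List.mem_append.mpr (Or.inr (by simp [hpd]))
        · exact List.mem_append.mpr (Or.inl ((hacchar p).mpr ⟨hp1, hp2, hp3, by omega⟩))
  | case2 t d acc h hm ih =>
    intro c hn ht hd hsmall hc haccpw haccbd hacchar
    obtain ⟨hdt, hd2⟩ := h
    have hdnd : ¬ d ∣ t := fun hdd => hm ((PySem.Int.mod_eq_zero_iff_dvd t d).mpr hdd)
    refine ih c hn ht (by omega) ?_ (fun q hq hqc => by have := hc q hq hqc; omega) haccpw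
      (fun a ha => by have := haccbd a ha; omega) ?_
    · intro k' hk'2 hk'd hk'dvd
      rcases lt_or_eq_of_le (show k' ≤ d by omega) with hlt | heq
      · exact hsmall k' hk'2 hlt hk'dvd
      · exact hdnd (heq ▸ hk'dvd)
    · intro p
      rw [hacchar p]
      constructor
      · rintro ⟨hp1, hp2, hp3, hp4⟩
        exact ⟨hp1, hp2, hp3, by omega⟩
      · rintro ⟨hp1, hp2, hp3, hp4⟩
        refine ⟨hp1, hp2, hp3, ?_⟩
        rcases lt_or_eq_of_le (show p ≤ d by omega) with hlt | heq
        · exact hlt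
        · exfalso
          subst heq
          rcases hp1.dvd_mul.mp (hn ▸ hp2) with hpc | hpt
          · have := hc p hp1 hpc; omega
          · exact hdnd hpt
  | case3 t d acc h =>
    intro c hn ht hd hsmall hc haccpw haccbd hacchar
    have htlt : t < d * d := by
      by_contra hcon
      push_neg at hcon
      exact h ⟨hcon, hd⟩
    by_cases ht2 : 2 ≤ t
    · have htd : d ≤ t := by
        by_contra hcon
        push_neg at hcon
        exact hsmall t ht2 hcon dvd_rfl
      have htprime : Prime t := pv_prime_of_no_small_divisor t d ht2 hd htlt hsmall
      refine ⟨haccpw, by omega, ?_, ?_⟩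
      · intro _
        exact ⟨fun p hp => by have := haccbd p hp; omega, htprime, ⟨c, by rw [hn]; ring⟩⟩
      · intro p
        constructor
        · rintro (hp | ⟨-, rfl⟩)
          · obtain ⟨h1, h2, h3, -⟩ := (hacchar p).mp hp
            exact ⟨h1, h2, h3⟩
          · exact ⟨htprime, ⟨c, by rw [hn]; ring⟩, ht2⟩
        · rintro ⟨hp1, hp2, hp3⟩
          rcases hp1.dvd_mul.mp (hn ▸ hp2) with hpc | hpt
          · exact Or.inl ((hacchar p).mpr ⟨hp1, hp2, hp3, hc p hp1 hpc⟩)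
          · exact Or.inr ⟨ht2, pv_eq_of_dvd_prime p t hp3 ht2 htprime hpt⟩
    · have ht1 : t = 1 := by omega
      refine ⟨haccpw, by omega, fun h2t => absurd h2t (by omega), ?_⟩
      intro p
      constructor
      · rintro (hp | ⟨h2t, rfl⟩)
        · obtain ⟨h1, h2, h3, -⟩ := (hacchar p).mp hp
          exact ⟨h1, h2, h3⟩
        · omega
      · rintro ⟨hp1, hp2, hp3⟩
        refine Or.inl ((hacchar p).mpr ⟨hp1, hp2, hp3, ?_⟩)
        have hpc : p ∣ c := by rw [hn, ht1, mul_one] at hp2; exact hp2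
        exact hc p hp1 hpc

theorem primfaktoren_char (n : Int) (hn : 2 ≤ n) :
    (primfaktoren n).Pairwise (· < ·) ∧
      ∀ p : Int, p ∈ primfaktoren n ↔ Prime p ∧ p ∣ n ∧ 2 ≤ p := by
  obtain ⟨hpw, h1, hbig, hmem⟩ := pfLoop_char n n 2 [] 1 (by ring) (by omega) (by omega)
    (fun k hk1 hk2 _ => by omega)
    (fun q hq hqd => absurd hq.2.1 (by simpa using isUnit_of_dvd_one hqd))
    (by simp) (by simp)
    (by intro p; simp only [List.not_mem_nil, false_iff]; rintro ⟨-, -, h2p, h2p'⟩; omega)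
  have hdef : primfaktoren n = if (pfLoop n 2 []).2 > 1 then
      (pfLoop n 2 []).1 ++ [(pfLoop n 2 []).2] else (pfLoop n 2 []).1 := rfl
  rw [hdef]
  by_cases hgt : (pfLoop n 2 []).2 > 1
  · rw [if_pos hgt]
    obtain ⟨hlt, hpr, hdvd⟩ := hbig (by omega)
    constructor
    · rw [List.pairwise_append]
      refine ⟨hpw, by simp, ?_⟩
      intro a ha b hb
      obtain rfl : b = (pfLoop n 2 []).2 := by simpa using hb
      exact hlt a ha
    · intro p
      rw [← hmem p, List.mem_append, List.mem_singleton]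
      constructor
      · rintro (h | h)
        · exact Or.inl h
        · exact Or.inr ⟨by omega, h⟩
      · rintro (h | ⟨-, h⟩)
        · exact Or.inl h
        · exact Or.inr h
  · rw [if_neg hgt]
    refine ⟨hpw, fun p => ?_⟩
    rw [← hmem p]
    constructor
    · exact fun h => Or.inl h
    · rintro (h | ⟨h2, -⟩)
      · exact h
      · omega

-- A's trial-division primality test decides primality (Nat.sqrt is exact for int(n**0.5) on Dom)
theorem ist_primzahl_iff (n : Int) (hn : 2 ≤ n) : ist_primzahl n = true ↔ n.toNat.Prime := by
  have hcast : (n.toNat : ℤ) = n := Int.toNat_of_nonneg (by omega)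
  unfold ist_primzahl
  rw [if_neg (show ¬ n < 2 by omega)]
  by_cases h2 : n = 2
  · subst h2
    decide
  · rw [if_neg h2]
    by_cases heven : PySem.Int.mod n 2 = 0
    · rw [if_pos heven]
      simp only [Bool.false_eq_true, false_iff]
      intro hp
      have h2d : (2 : ℤ) ∣ n := (PySem.Int.mod_eq_zero_iff_dvd n 2).mp heven
      have h2dn : 2 ∣ n.toNat := by
        have hx : ((2 : ℕ) : ℤ) ∣ (n.toNat : ℤ) := by rw [hcast]; exact_mod_cast h2d
        exact_mod_cast hx
      rcases hp.eq_one_or_self_of_dvd 2 h2dn with h | h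
      · omega
      · exact h2 (by omega)
    · rw [if_neg heven]
      have hodd : ¬ (2 : ℤ) ∣ n := fun hd => heven ((PySem.Int.mod_eq_zero_iff_dvd n 2).mpr hd)
      by_cases hany : (PySem.List.pyRange 3 ((n.toNat.sqrt : Int) + 1) 2).any
          (fun i => PySem.Int.mod n i == 0) = true
      · rw [if_pos hany]
        simp only [Bool.false_eq_true, false_iff]
        intro hp
        obtain ⟨i, hi_mem, hi⟩ := List.any_eq_true.mp hany
        have hidvd : i ∣ n := (PySem.Int.mod_eq_zero_iff_dvd n i).mp (by simpa using hi)
        obtain ⟨hi3, hilt, -⟩ := (PySem.List.mem_pyRange_iff_of_pos (by omega) i).mp hi_mem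
        have hsqlt : (n.toNat.sqrt : ℤ) < n := by
          have := Nat.sqrt_lt_self (show 1 < n.toNat by omega)
          omega
        have hic : (i.toNat : ℤ) = i := Int.toNat_of_nonneg (by omega)
        have hidn : i.toNat ∣ n.toNat := by
          have hx : ((i.toNat : ℕ) : ℤ) ∣ ((n.toNat : ℕ) : ℤ) := by rw [hcast, hic]; exact hidvd
          exact_mod_cast hx
        rcases hp.eq_one_or_self_of_dvd i.toNat hidn with h | h
        · omega
        · omega
      · rw [if_neg hany]
        simp only [true_iff]
        by_contra hp
        have hmf := Nat.minFac_dvd n.toNat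
        have hmfp := Nat.minFac_prime (show n.toNat ≠ 1 by omega)
        have hsq := Nat.minFac_sq_le_self (show 0 < n.toNat by omega) hp
        rw [pow_two] at hsq
        have hp2 : 2 ≤ n.toNat.minFac := hmfp.two_le
        have hpne2 : n.toNat.minFac ≠ 2 := by
          intro he
          apply hodd
          have hx : (2 : ℕ) ∣ n.toNat := he ▸ hmf
          have hx2 : ((2 : ℕ) : ℤ) ∣ (n.toNat : ℤ) := Int.natCast_dvd_natCast.mpr hx
          rwa [hcast] at hx2
        have hp3 : 3 ≤ n.toNat.minFac := by
          rcases Nat.lt_or_ge n.toNat.minFac 3 with h | h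
          · omega
          · exact h
        have hpodd := hmfp.odd_of_ne_two hpne2
        have hple : n.toNat.minFac ≤ n.toNat.sqrt := Nat.le_sqrt.mpr hsq
        apply absurd hany
        simp only [not_not]
        apply List.any_eq_true.mpr
        refine ⟨(n.toNat.minFac : ℤ), ?_, ?_⟩
        · rw [PySem.List.mem_pyRange_iff_of_pos (by omega)]
          obtain ⟨j, hj⟩ := hpodd
          have hjz : ((n.toNat.minFac : ℕ) : ℤ) = 2 * (j : ℤ) + 1 := by exact_mod_cast hj
          refine ⟨by exact_mod_cast hp3, ?_, ⟨(j : ℤ) - 1, by omega⟩⟩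
          have : ((n.toNat.minFac : ℕ) : ℤ) ≤ ((n.toNat.sqrt : ℕ) : ℤ) := by exact_mod_cast hple
          omega
        · have hx : ((n.toNat.minFac : ℕ) : ℤ) ∣ (n.toNat : ℤ) := Int.natCast_dvd_natCast.mpr hmf
          rw [hcast] at hx
          simp [PySem.Int.mod_eq_zero_iff_dvd, hx]

-- B's factor search finds exactly the least divisor (when its square fits)
theorem zerlegeFind_spec (m d : Int) : 1 ≤ m → 2 ≤ d →
    (∀ k : Int, 2 ≤ k → k < d → ¬ k ∣ m) →
    (zerlegeFind m d = none → ∀ k : Int, 2 ≤ k → k * k ≤ m → ¬ k ∣ m) ∧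
    (∀ p : Int, zerlegeFind m d = some p → ∀ k : Int, 2 ≤ k → k < p → ¬ k ∣ m) := by
  fun_induction zerlegeFind m d with
  | case1 d h hm =>
    intro h1 hd hsmall
    constructor
    · intro hnone
      exact absurd hnone (by simp)
    · intro p hp
      obtain rfl : d = p := by simpa using hp
      exact hsmall
  | case2 d h hm ih =>
    intro h1 hd hsmall
    refine ih h1 (by omega) ?_
    intro k hk1 hk2
    rcases lt_or_eq_of_le (show k ≤ d by omega) with hlt | heq
    · exact hsmall k hk1 hlt
    · subst heq
      exact fun hdd => hm ((PySem.Int.mod_eq_zero_iff_dvd m k).mpr hdd)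
  | case3 d h =>
    intro h1 hd hsmall
    constructor
    · intro _ k hk1 hkk
      have hmlt : m < d * d := by
        by_contra hcon
        push_neg at hcon
        exact h ⟨hcon, hd⟩
      have hkd : k < d := by
        by_contra hcon
        push_neg at hcon
        have : d * d ≤ k * k := mul_le_mul hcon hcon (by omega) (by omega)
        omega
      exact hsmall k hk1 hkd
    · intro p hp
      exact absurd hp (by simp)

-- B's zerlege is the minFac recursion: the full prime factor multiset, in order
theorem zerlege_eq (m : Int) : 2 ≤ m →
    zerlege m = List.map (fun q : ℕ => (q : Int)) m.toNat.primeFactorsList := by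
  fun_induction zerlege m with
  | case1 m d hf ih =>
    intro hm
    obtain ⟨hd2, hddm, hmod⟩ := zerlegeFind_some m 2 d hf
    have hdvd : d ∣ m := (PySem.Int.mod_eq_zero_iff_dvd m d).mp hmod
    have hmin : ∀ k : Int, 2 ≤ k → k < d → ¬ k ∣ m :=
      (zerlegeFind_spec m 2 (by omega) (le_refl _)
        (fun k hk1 hk2 => absurd hk2 (by omega))).2 d hf
    have hmnc : (m.toNat : ℤ) = m := Int.toNat_of_nonneg (by omega)
    have hdc : (d.toNat : ℤ) = d := Int.toNat_of_nonneg (by omega)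
    have hdvdn : d.toNat ∣ m.toNat := by
      have hx : ((d.toNat : ℕ) : ℤ) ∣ ((m.toNat : ℕ) : ℤ) := by rw [hdc, hmnc]; exact hdvd
      exact_mod_cast hx
    have hminfac : m.toNat.minFac = d.toNat := by
      have hle : m.toNat.minFac ≤ d.toNat := Nat.minFac_le_of_dvd (by omega) hdvdn
      by_contra hne
      have hlt : m.toNat.minFac < d.toNat := by omega
      have h2f : 2 ≤ m.toNat.minFac := (Nat.minFac_prime (by omega : m.toNat ≠ 1)).two_le
      refine hmin (m.toNat.minFac : ℤ) (by exact_mod_cast h2f) (by omega) ?_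
      rw [← hmnc]
      exact_mod_cast Nat.minFac_dvd m.toNat
    have hq : PySem.Int.floordiv m d = ((m.toNat / d.toNat : ℕ) : ℤ) := by
      rw [PySem.Int.floordiv_eq_ediv_of_pos (by omega), ← hmnc, ← hdc]
      exact_mod_cast (Int.natCast_div m.toNat d.toNat).symm
    have hq2 : 2 ≤ ((m.toNat / d.toNat : ℕ) : ℤ) := by
      have hge : d.toNat ≤ m.toNat / d.toNat := (Nat.le_div_iff_mul_le (by omega)).mpr (by
        have hx : (d.toNat : ℤ) * (d.toNat : ℤ) ≤ (m.toNat : ℤ) := by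
          rw [hdc, hmnc]; exact hddm
        exact_mod_cast hx)
      have : 2 ≤ m.toNat / d.toNat := by omega
      exact_mod_cast this
    rw [ih (by rw [hq]; exact hq2)]
    have htn : (PySem.Int.floordiv m d).toNat = m.toNat / d.toNat := by
      rw [hq]; exact Int.toNat_natCast _
    rw [htn]
    obtain ⟨j, hj⟩ : ∃ j, m.toNat = j + 2 := ⟨m.toNat - 2, by omega⟩
    conv_rhs => rw [hj, Nat.primeFactorsList_add_two, ← hj]
    rw [hminfac]
    simp [hdc]
  | case2 m hf =>
    intro hm
    have hnone := (zerlegeFind_spec m 2 (by omega) (le_refl _)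
      (fun k hk1 hk2 => absurd hk2 (by omega))).1 hf
    have hmnc : (m.toNat : ℤ) = m := Int.toNat_of_nonneg (by omega)
    have hp : m.toNat.Prime := by
      by_contra hnp
      have hmf := Nat.minFac_dvd m.toNat
      have hmfp := Nat.minFac_prime (show m.toNat ≠ 1 by omega)
      have hsq := Nat.minFac_sq_le_self (show 0 < m.toNat by omega) hnp
      rw [pow_two] at hsq
      refine hnone (m.toNat.minFac : ℤ) (by exact_mod_cast hmfp.two_le) ?_ ?_
      · rw [← hmnc]; exact_mod_cast hsq
      · rw [← hmnc]; exact_mod_cast hmf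
    rw [Nat.primeFactorsList_prime hp]
    simp [hmnc]

theorem zerlege_len_one (m : Int) (hm : 2 ≤ m) : (zerlege m).length = 1 ↔ m.toNat.Prime := by
  rw [zerlege_eq m hm, List.length_map]
  constructor
  · intro h1
    obtain ⟨q, hq⟩ := List.length_eq_one_iff.mp h1
    have hprod := Nat.prod_primeFactorsList (show m.toNat ≠ 0 by omega)
    rw [hq] at hprod
    simp only [List.prod_cons, List.prod_nil, mul_one] at hprod
    have hqp : q.Prime := Nat.prime_of_mem_primeFactorsList (by rw [hq]; simp)
    rwa [hprod] at hqp
  · intro hp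
    rw [Nat.primeFactorsList_prime hp]
    rfl

theorem mem_zerlege (n : Int) (hn : 2 ≤ n) :
    ∀ p : Int, p ∈ zerlege n ↔ Prime p ∧ p ∣ n ∧ 2 ≤ p := by
  intro p
  rw [zerlege_eq n hn]
  have hmnc : (n.toNat : ℤ) = n := Int.toNat_of_nonneg (by omega)
  simp only [List.mem_map]
  constructor
  · rintro ⟨q, hq, rfl⟩
    rw [Nat.mem_primeFactorsList (by omega : n.toNat ≠ 0)] at hq
    obtain ⟨hqp, hqd⟩ := hq
    refine ⟨Nat.prime_iff_prime_int.mp hqp, ?_, by exact_mod_cast hqp.two_le⟩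
    rw [← hmnc]
    exact_mod_cast hqd
  · rintro ⟨hp, hpd, h2p⟩
    refine ⟨p.toNat, ?_, Int.toNat_of_nonneg (by omega)⟩
    rw [Nat.mem_primeFactorsList (by omega : n.toNat ≠ 0)]
    constructor
    · have hna : p.natAbs = p.toNat := by omega
      have hx := Int.prime_iff_natAbs_prime.mp hp
      rwa [hna] at hx
    · have hx : ((p.toNat : ℕ) : ℤ) ∣ ((n.toNat : ℕ) : ℤ) := by
        rw [hmnc, Int.toNat_of_nonneg (by omega : (0 : ℤ) ≤ p)]
        exact hpd
      exact_mod_cast hx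

theorem zerlege_pairwise_le (n : Int) (hn : 2 ≤ n) : (zerlege n).Pairwise (· ≤ ·) := by
  rw [zerlege_eq n hn]
  exact List.Pairwise.map _ (fun a b h => by exact_mod_cast h)
    ((Nat.primeFactorsList_sorted n.toNat).pairwise)

-- dedupLoop facts
theorem mem_dedupLoop (l : List Int) : ∀ (acc : List Int) (x : Int),
    x ∈ dedupLoop acc l ↔ x ∈ acc ∨ x ∈ l := by
  induction l with
  | nil => intro acc x; simp [dedupLoop]
  | cons p rest ih =>
    intro acc x
    simp only [dedupLoop]
    split_ifs with hcond
    · rw [ih]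
      simp only [List.mem_append, List.mem_singleton, List.mem_cons]
      tauto
    · rw [ih]
      push_neg at hcond
      obtain ⟨hne, hlast⟩ := hcond
      have hpmem : p ∈ acc := List.mem_of_getLast? hlast
      simp only [List.mem_cons]
      constructor
      · tauto
      · rintro (h | rfl | h)
        · exact Or.inl h
        · exact Or.inl hpmem
        · exact Or.inr h

theorem pw_lt_le_getLast (acc : List Int) : acc.Pairwise (· < ·) →
    ∀ b : Int, acc.getLast? = some b → ∀ a ∈ acc, a ≤ b := by
  induction acc with
  | nil => intro _ b hb; simp at hb
  | cons a rest ih =>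
    intro hpw b hb a' ha'
    cases rest with
    | nil =>
      simp at hb ha'
      omega
    | cons c cs =>
      have hb' : (c :: cs).getLast? = some b := by rwa [List.getLast?_cons_cons] at hb
      have hbmem : b ∈ c :: cs := List.mem_of_getLast? hb'
      rcases List.mem_cons.mp ha' with rfl | hmem
      · exact le_of_lt ((List.pairwise_cons.mp hpw).1 b hbmem)
      · exact ih (List.pairwise_cons.mp hpw).2 b hb' a' hmem

theorem dedupLoop_pairwise (l : List Int) : ∀ acc : List Int, l.Pairwise (· ≤ ·) →
    acc.Pairwise (· < ·) → (∀ a ∈ acc, ∀ x ∈ l, a ≤ x) →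
    (dedupLoop acc l).Pairwise (· < ·) := by
  induction l with
  | nil => intro acc _ hacc _; simpa [dedupLoop] using hacc
  | cons p rest ih =>
    intro acc hl hacc hle
    obtain ⟨hp_rest, hrest⟩ := List.pairwise_cons.mp hl
    simp only [dedupLoop]
    split_ifs with hcond
    · refine ih (acc ++ [p]) hrest ?_ ?_
      · rw [List.pairwise_append]
        refine ⟨hacc, by simp, ?_⟩
        intro a ha b hb
        obtain rfl : b = p := by simpa using hb
        rcases hcond with hnil | hlast
        · exact absurd ha (by simp [hnil])
        · cases hgl : acc.getLast? with
          | none => exact absurd ha (by simp [List.getLast?_eq_none_iff.mp hgl])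
          | some g =>
            have hag : a ≤ g := pw_lt_le_getLast acc hacc g hgl a ha
            have hgp : g ≤ b := hle g (List.mem_of_getLast? hgl) b (by simp)
            have hgb : g ≠ b := fun he => hlast (by rw [hgl, he])
            omega
      · intro a ha x hx
        rcases List.mem_append.mp ha with h' | h'
        · exact hle a h' x (by simp [hx])
        · obtain rfl : a = p := by simpa using h'
          exact hp_rest x hx
    · exact ih acc hrest hacc (fun a ha x hx => hle a ha x (by simp [hx]))

theorem dedupLoop_eq_append (l : List Int) : ∀ acc : List Int, l.Pairwise (· < ·) →
    (∀ b : Int, acc.getLast? = some b → ∀ x ∈ l, b ≠ x) →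
    dedupLoop acc l = acc ++ l := by
  induction l with
  | nil => intro acc _ _; simp [dedupLoop]
  | cons p rest ih =>
    intro acc hl hb
    simp only [dedupLoop]
    rw [if_pos ?hc]
    case hc =>
      cases hgl : acc.getLast? with
      | none => exact Or.inl (List.getLast?_eq_none_iff.mp hgl)
      | some g =>
        refine Or.inr ?_
        simp only [ne_eq, Option.some.injEq]
        exact hb g hgl p (by simp)
    rw [ih (acc ++ [p]) (List.pairwise_cons.mp hl).2 ?_]
    · simp
    · intro b hb' x hx
      rw [List.getLast?_concat] at hb'
      obtain rfl : p = b := by simpa using hb'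
      exact ne_of_lt ((List.pairwise_cons.mp hl).1 x hx)

theorem dedupLoop_length_le (l : List Int) : ∀ acc : List Int,
    (dedupLoop acc l).length ≤ acc.length + l.length := by
  induction l with
  | nil => intro acc; simp [dedupLoop]
  | cons p rest ih =>
    intro acc
    simp only [dedupLoop]
    split_ifs with hcond
    · have := ih (acc ++ [p])
      simp only [List.length_append, List.length_cons, List.length_nil] at this ⊢
      omega
    · have := ih acc
      simp only [List.length_cons] at this ⊢
      omega

theorem sorted_head_of_mem (p : Int) (rest : List Int)
    (hl : (p :: rest).Pairwise (· ≤ ·)) (hp : p ∈ rest) : ∃ r', rest = p :: r' := by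
  cases rest with
  | nil => simp at hp
  | cons b r'' =>
    have hpb : p ≤ b := (List.pairwise_cons.mp hl).1 b (by simp)
    rcases List.mem_cons.mp hp with rfl | hmem
    · exact ⟨r'', rfl⟩
    · have hbp : b ≤ p := (List.pairwise_cons.mp ((List.pairwise_cons.mp hl).2)).1 p hmem
      obtain rfl : p = b := le_antisymm hpb hbp
      exact ⟨r'', rfl⟩

theorem dedupLoop_len_eq (l : List Int) : ∀ acc : List Int, l.Pairwise (· ≤ ·) →
    (dedupLoop acc l).length = acc.length + l.length → l.Nodup := by
  induction l with
  | nil => intro acc _ _; simp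
  | cons p rest ih =>
    intro acc hl hlen
    simp only [dedupLoop] at hlen
    split_ifs at hlen with hcond
    · have hlen' : (dedupLoop (acc ++ [p]) rest).length = (acc ++ [p]).length + rest.length := by
        simp only [List.length_append, List.length_cons, List.length_nil] at hlen ⊢
        omega
      have hnd := ih (acc ++ [p]) (List.pairwise_cons.mp hl).2 hlen'
      refine List.nodup_cons.mpr ⟨?_, hnd⟩
      intro hpmem
      obtain ⟨r', rfl⟩ := sorted_head_of_mem p rest hl hpmem
      have hskip : dedupLoop (acc ++ [p]) (p :: r') = dedupLoop (acc ++ [p]) r' := by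
        simp only [dedupLoop]
        rw [if_neg]
        simp [List.getLast?_concat]
      rw [hskip] at hlen'
      have hle2 := dedupLoop_length_le r' (acc ++ [p])
      simp only [List.length_append, List.length_cons, List.length_nil] at hlen' hle2
      omega
    · have hle2 := dedupLoop_length_le (p :: rest) acc
      simp only [dedupLoop] at hle2
      rw [if_neg hcond] at hle2
      have hle3 := dedupLoop_length_le rest acc
      simp only [List.length_append, List.length_cons, List.length_nil] at hlen
      omega

theorem dedupLoop_len_iff (l : List Int) (hl : l.Pairwise (· ≤ ·)) :
    (dedupLoop [] l).length = l.length ↔ l.Nodup := by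
  constructor
  · intro h
    exact dedupLoop_len_eq l [] hl (by simpa using h)
  · intro hnd
    have hpwlt : l.Pairwise (· < ·) := (hl.and hnd).imp (fun h => lt_of_le_of_ne h.1 h.2)
    rw [dedupLoop_eq_append l [] hpwlt (fun b hb => by simp at hb)]
    simp

-- two strictly increasing lists with the same members are equal
theorem pw_lt_eq_of_mem (l1 : List Int) : ∀ l2 : List Int, l1.Pairwise (· < ·) →
    l2.Pairwise (· < ·) → (∀ x : Int, x ∈ l1 ↔ x ∈ l2) → l1 = l2 := by
  induction l1 with
  | nil =>
    intro l2 _ _ hm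
    cases l2 with
    | nil => rfl
    | cons b r => exact absurd ((hm b).mpr (by simp)) (by simp)
  | cons a r1 ih =>
    intro l2 h1 h2 hm
    cases l2 with
    | nil => exact absurd ((hm a).mp (by simp)) (by simp)
    | cons b r2 =>
      have hab : a = b := by
        rcases List.mem_cons.mp ((hm a).mp (by simp)) with h | hain
        · exact h
        · rcases List.mem_cons.mp ((hm b).mpr (by simp)) with h | hbin
          · exact h.symm
          · have hx := (List.pairwise_cons.mp h1).1 b hbin
            have hy := (List.pairwise_cons.mp h2).1 a hain
            omega
      subst hab
      congr 1
      refine ih r2 (List.pairwise_cons.mp h1).2 (List.pairwise_cons.mp h2).2 ?_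
      intro x
      constructor
      · intro hx
        rcases List.mem_cons.mp ((hm x).mp (by simp [hx])) with rfl | h
        · have := (List.pairwise_cons.mp h1).1 x hx
          omega
        · exact h
      · intro hx
        rcases List.mem_cons.mp ((hm x).mpr (by simp [hx])) with rfl | h
        · have := (List.pairwise_cons.mp h2).1 x hx
          omega
        · exact h

-- the squarefree tests agree: some listed prime has p² ∣ n  iff  dedup loses an element
theorem squarefree_bridge (n : Int) (hn : 2 ≤ n) :
    ((∃ p ∈ primfaktoren n, p * p ∣ n) ↔
      (dedupLoop [] (zerlege n)).length ≠ (zerlege n).length) := by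
  have hmnc : (n.toNat : ℤ) = n := Int.toNat_of_nonneg (by omega)
  have hF := (primfaktoren_char n hn).2
  rw [Ne, dedupLoop_len_iff (zerlege n) (zerlege_pairwise_le n hn), zerlege_eq n hn,
    List.nodup_map_iff (by intro a b h; simpa using h : Function.Injective (fun q : ℕ => (q : ℤ))),
    ← Nat.squarefree_iff_nodup_primeFactorsList (by omega : n.toNat ≠ 0),
    Nat.squarefree_iff_prime_squarefree]
  push_neg
  constructor
  · rintro ⟨p, hp, hpd⟩
    obtain ⟨hpp, hpdn, h2p⟩ := (hF p).mp hp
    refine ⟨p.toNat, ?_, ?_⟩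
    · have hna : p.natAbs = p.toNat := by omega
      have := Int.prime_iff_natAbs_prime.mp hpp
      rwa [hna] at this
    · have hx : ((p.toNat * p.toNat : ℕ) : ℤ) ∣ ((n.toNat : ℕ) : ℤ) := by
        push_cast
        rw [Int.toNat_of_nonneg (by omega : (0 : ℤ) ≤ p), hmnc]
        exact hpd
      exact_mod_cast hx
  · rintro ⟨x, hxp, hxd⟩
    refine ⟨(x : ℤ), ?_, ?_⟩
    · rw [hF]
      refine ⟨Nat.prime_iff_prime_int.mp hxp, ?_, by exact_mod_cast hxp.two_le⟩
      have hxn : x ∣ n.toNat := dvd_trans (dvd_mul_right x x) hxd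
      rw [← hmnc]
      exact_mod_cast hxn
    · have hx : ((x * x : ℕ) : ℤ) ∣ ((n.toNat : ℕ) : ℤ) := by exact_mod_cast hxd
      rw [hmnc] at hx
      push_cast at hx
      exact hx

theorem korLoopB_eq (n : Int) (f : List Int) : ∀ l : List Int, korLoopB n f l = korLoopA n f l := by
  intro l
  induction l with
  | nil => rfl
  | cons p rest ih =>
    simp only [korLoopA, korLoopB]
    split_ifs with h
    · rfl
    · exact ih

theorem primfaktoren_eq_dedup (n : Int) (hn : 2 ≤ n) :
    primfaktoren n = dedupLoop [] (zerlege n) := by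
  obtain ⟨hpw, hmem⟩ := primfaktoren_char n hn
  refine pw_lt_eq_of_mem _ _ hpw ?_ ?_
  · exact dedupLoop_pairwise _ [] (zerlege_pairwise_le n hn) (by simp) (by simp)
  · intro x
    rw [hmem, mem_dedupLoop, mem_zerlege n hn]
    simp

-- ===== VERDICT =====
theorem ist_carmichael_zahl_mit_begruendung_spec : Claim_equal_ist_carmichael_zahl_mit_begruendung := by
  intro n _
  unfold Spec_ist_carmichael_zahl_mit_begruendung
  by_cases h2 : n < 2
  · simp [ist_carmichael_zahl_mit_begruendung, ist_carmichael_zahl_mit_begruendung_alt, h2]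
  · have hn : 2 ≤ n := by omega
    simp only [ist_carmichael_zahl_mit_begruendung, ist_carmichael_zahl_mit_begruendung_alt,
      if_neg h2]
    by_cases hprime : n.toNat.Prime
    · rw [if_pos ((ist_primzahl_iff n hn).mpr hprime), if_pos ((zerlege_len_one n hn).mpr hprime)]
    · rw [if_neg (fun hx => hprime ((ist_primzahl_iff n hn).mp hx)),
        if_neg (fun hx => hprime ((zerlege_len_one n hn).mp hx))]
      rw [primfaktoren_eq_dedup n hn]
      by_cases hlen : (dedupLoop [] (zerlege n)).length < 3
      · rw [if_pos hlen, if_pos hlen]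
      · rw [if_neg hlen, if_neg hlen]
        have hbr := squarefree_bridge n hn
        rw [primfaktoren_eq_dedup n hn] at hbr
        by_cases hsq : ∃ p ∈ dedupLoop [] (zerlege n), p * p ∣ n
        · have hA : ist_quadratfrei n (dedupLoop [] (zerlege n)) = false := by
            obtain ⟨p, hp, hpd⟩ := hsq
            simp only [ist_quadratfrei, Bool.not_eq_false', List.any_eq_true]
            exact ⟨p, hp, by simp [PySem.Int.mod_eq_zero_iff_dvd, hpd]⟩
          rw [hA, if_pos (hbr.mp hsq)]
          rfl
        · have hA : ist_quadratfrei n (dedupLoop [] (zerlege n)) = true := by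
            simp only [ist_quadratfrei, Bool.not_eq_true', List.any_eq_false]
            intro p hp
            simp only [beq_iff_eq, PySem.Int.mod_eq_zero_iff_dvd]
            exact fun hd => hsq ⟨p, hp, hd⟩
          rw [hA, if_neg (fun hx => hsq (hbr.mpr hx))]
          simp only [Bool.not_true, Bool.false_eq_true, if_false]
          exact (korLoopB_eq n _ _).symm
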